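-- pv_equiv track=rewrite | github.com/kyutech-programming-club/seat-changer | flaskr/room.py | hobby_high_score_index
-- ===== SOURCE A (Python) =====
-- def hobby_high_score_index(score_list):
--   index_list = []
--   high_score_list = sorted(score_list, reverse=True)
--
--   for i, score in enumerate(score_list):
--     for high_score in high_score_list[:3]:
--       if high_score == score:
--         index_list.append(i)
--         break
--
--   return index_list
-- ===== SOURCE B (Python) =====
-- def _insert_desc(x, top):
--   if not top:
--     return [x]
--   if x <= top[0]:
--     return [top[0]] + _insert_desc(x, top[1:])
--   return [x] + top
--
--
-- def hobby_high_score_index(score_list):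
--   # single streaming pass: maintain only the three largest values seen so far
--   top = []
--   for score in score_list:
--     top = _insert_desc(score, top)[:3]
--   if not top:
--     return []
--   threshold = top[-1]
--   return [i for i, score in enumerate(score_list) if score >= threshold]
-- ===== Notes on version B (the rewrite author's own statement) =====
-- stated objective: alternative
-- what changed: Instead of sorting the whole list and membership-testing each element against the top-3 slice, B streams once over the list maintaining a bounded buffer of the three largest values, then emits indices of elements at least the buffer's minimum.
import Mathlib
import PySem

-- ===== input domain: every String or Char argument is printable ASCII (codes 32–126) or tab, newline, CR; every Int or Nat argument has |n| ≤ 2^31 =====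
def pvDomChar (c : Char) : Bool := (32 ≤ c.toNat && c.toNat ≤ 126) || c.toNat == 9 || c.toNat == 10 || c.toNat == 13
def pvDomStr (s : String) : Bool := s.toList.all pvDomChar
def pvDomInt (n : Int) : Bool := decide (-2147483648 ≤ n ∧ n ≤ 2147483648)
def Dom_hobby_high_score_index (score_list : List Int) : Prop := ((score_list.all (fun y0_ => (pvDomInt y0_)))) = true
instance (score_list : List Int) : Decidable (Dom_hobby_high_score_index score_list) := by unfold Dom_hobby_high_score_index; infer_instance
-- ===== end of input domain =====

-- B replaces A's full sort + top-3 membership scan with a single streaming pass keeping a bounded buffer of the three largest values, then one threshold filter (objective: alternative).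


-- ===== PORT A =====
-- inner 'for high_score in high_score_list[:3]: if high_score == score: append i; break'
def hhsiInner (hs : List Int) (index_list : List Int) (i : Int) (score : Int) : List Int :=
  match hs with
  | [] => index_list
  | h :: t => if h = score then index_list ++ [i] else hhsiInner t index_list i score

def hobby_high_score_index (score_list : List Int) : List Int :=
  let high_score_list := PySem.List.sorted score_list (fun x => x) true
  let top3 := PySem.List.slice high_score_list none (some 3)
  (PySem.List.enumerate score_list).foldl
    (fun index_list p => hhsiInner top3 index_list p.1 p.2) []

-- ===== PORT B =====
-- '_insert_desc(x, top)': insert x into a descending list, after all elements ≥ x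
def insertDesc (x : Int) : List Int → List Int
  | [] => [x]
  | h :: t => if x ≤ h then h :: insertDesc x t else x :: h :: t

def hobby_high_score_index_alt (score_list : List Int) : List Int :=
  let top := score_list.foldl (fun top score => (insertDesc score top).take 3) []
  if top = [] then []
  else
    let threshold := PySem.List.pyGetD top (-1) 0
    ((PySem.List.enumerate score_list).filter (fun p => threshold ≤ p.2)).map (fun p => p.1)

-- ===== PRECONDITION & SPEC =====
def Spec_hobby_high_score_index (score_list : List Int) (out : List Int) : Prop := out = hobby_high_score_index_alt score_list
instance (score_list : List Int) (out : List Int) : Decidable (Spec_hobby_high_score_index score_list out) := by unfold Spec_hobby_high_score_index; infer_instance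

-- ===== CLAIM (what is proved, stated in full; the proofs are below) =====
def Claim_equal_hobby_high_score_index : Prop := ∀ (score_list : List Int), Dom_hobby_high_score_index score_list → Spec_hobby_high_score_index score_list (hobby_high_score_index score_list)

-- ===== LEMMAS AND PROOFS =====

-- A's inner loop is a membership test
theorem hhsiInner_eq (hs index_list : List Int) (i score : Int) :
    hhsiInner hs index_list i score = if score ∈ hs then index_list ++ [i] else index_list := by
  induction hs with
  | nil => simp [hhsiInner]
  | cons h t ih =>
    by_cases hh : h = score
    · simp [hhsiInner, hh]
    · simp [hhsiInner, hh, ih, Ne.symm hh]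

-- B's insert coincides with the stable descending insert of PySem's insertion sort
theorem insertDesc_eq_insertBy (x : Int) (s : List Int) :
    insertDesc x s = PySem.List.insertBy (fun a b => decide (b < a)) x s := by
  induction s with
  | nil => rfl
  | cons h t ih =>
    by_cases hx : x ≤ h
    · simp [insertDesc, PySem.List.insertBy, hx, not_lt.mpr hx, ih]
    · simp [insertDesc, PySem.List.insertBy, hx, lt_of_not_ge hx]

-- truncating the buffer to 3 before inserting does not change the first three elements
theorem take3_insertDesc (x : Int) (s : List Int) :
    (insertDesc x (s.take 3)).take 3 = (insertDesc x s).take 3 := by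
  match s with
  | [] => rfl
  | [a] => rfl
  | [a, b] => rfl
  | a :: b :: c :: t =>
    simp only [List.take]
    by_cases h1 : x ≤ a <;> by_cases h2 : x ≤ b <;> by_cases h3 : x ≤ c <;>
      simp [insertDesc, h1, h2, h3, List.take]

-- B's fold computes the first three elements of the full insertion sort
theorem fold3_eq_take3 (l : List Int) (s : List Int) :
    l.foldl (fun t x => (insertDesc x t).take 3) (s.take 3)
      = (l.foldl (fun t x => insertDesc x t) s).take 3 := by
  induction l generalizing s with
  | nil => rfl
  | cons a l ih =>
    simp only [List.foldl_cons, take3_insertDesc a s]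
    exact ih (insertDesc a s)

theorem top_eq_take3_sorted (l : List Int) :
    l.foldl (fun t x => (insertDesc x t).take 3) []
      = (PySem.List.sorted l (fun x => x) true).take 3 := by
  have h := fold3_eq_take3 l []
  simp only [List.take_nil] at h
  rw [h, PySem.List.sorted_rev_eq_foldl_insertBy l (fun x => x)]
  induction l using List.reverseRecOn with
  | nil => rfl
  | append_singleton t a ih => simp [List.foldl_append, insertDesc_eq_insertBy]

-- in a descending list, the last element is a lower bound
theorem getLast_le_of_mem {s : List Int} (hp : s.Pairwise (fun a b => b ≤ a))
    (hne : s ≠ []) {x : Int} (hx : x ∈ s) : s.getLast hne ≤ x := by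
  induction s with
  | nil => exact absurd rfl hne
  | cons a t ih =>
    rcases List.mem_cons.mp hx with rfl | hx'
    · cases t with
      | nil => simp [List.getLast]
      | cons b u =>
        have : (b :: u).getLast (by simp) ∈ b :: u := List.getLast_mem _
        have := (List.pairwise_cons.mp hp).1 _ this
        simpa [List.getLast_cons] using this
    · have htne : t ≠ [] := List.ne_nil_of_mem hx'
      have := ih (List.pairwise_cons.mp hp).2 htne hx'
      cases t with
      | nil => exact absurd rfl htne
      | cons b u => simpa [List.getLast_cons] using this

-- membership in the three largest values ⟺ at least their minimum
theorem mem_take3_iff_getLast_le (s : List Int) (hpw : s.Pairwise (fun a b => b ≤ a))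
    (x : Int) (hmem : x ∈ s) (hne : s.take 3 ≠ []) :
    (x ∈ s.take 3 ↔ (s.take 3).getLast hne ≤ x) := by
  have hpw3 : (s.take 3).Pairwise (fun a b => b ≤ a) := hpw.sublist (List.take_sublist 3 s)
  constructor
  · intro hmt
    exact getLast_le_of_mem hpw3 hne hmt
  · intro hle
    match s, hpw, hmem, hne, hle with
    | [a], _, hmem, _, _ => simpa using hmem
    | [a, b], _, hmem, _, _ => simpa using hmem
    | [a, b, c], _, hmem, _, _ => simpa using hmem
    | a :: b :: c :: d :: rest, hpw, hmem, hne, hle =>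
      have hget : ((a :: b :: c :: d :: rest).take 3).getLast hne = c := by
        simp [List.take, List.getLast]
      rw [hget] at hle
      have hrest : ∀ y ∈ d :: rest, y ≤ c :=
        (List.pairwise_cons.mp (List.pairwise_cons.mp (List.pairwise_cons.mp hpw).2).2).1
      simp only [List.take, List.mem_cons, List.not_mem_nil, or_false] at hmem ⊢
      rcases hmem with rfl | rfl | rfl | hm
      · left; rfl
      · right; left; rfl
      · right; right; rfl
      · right; right; exact le_antisymm (hrest x (List.mem_cons.mpr hm)) hle

-- ===== VERDICT (by name: the statement is the Claim_ definition above) =====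
theorem hobby_high_score_index_spec : Claim_equal_hobby_high_score_index := by
  intro l _hdom
  unfold Spec_hobby_high_score_index hobby_high_score_index hobby_high_score_index_alt
  simp only [top_eq_take3_sorted]
  set s := PySem.List.sorted l (fun x => x) true with hsdef
  have hslice : PySem.List.slice s none (some 3) = s.take 3 := by
    simpa using PySem.List.slice_to_natCast s 3
  by_cases hne : s.take 3 = []
  · -- empty input: A's fold over enumerate [] is []
    have hl : l = [] := by
      have : s = [] := by
        cases hs : s with
        | nil => rfl
        | cons a t => rw [hs] at hne; simp [List.take] at hne
      exact (PySem.List.sorted_eq_nil_iff l (fun x => x) true).mp this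
    subst hl
    simp [hne, PySem.List.enumerate]
  · simp only [if_neg hne]
    rw [PySem.List.pyGetD_neg_one (s.take 3) 0 hne, hslice]
    have hfold := PySem.List.foldl_append_ite
      (fun p : Int × Int => p.2 ∈ s.take 3) (fun p => p.1) (PySem.List.enumerate l) []
    simp only [List.nil_append] at hfold
    calc (PySem.List.enumerate l).foldl
          (fun index_list p => hhsiInner (s.take 3) index_list p.1 p.2) []
        = ((PySem.List.enumerate l).filter
            (fun p => decide (p.2 ∈ s.take 3))).map (fun p => p.1) := by
          simp only [hhsiInner_eq]
          exact hfold
      _ = ((PySem.List.enumerate l).filter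
            (fun p => (s.take 3).getLast hne ≤ p.2)).map (fun p => p.1) := by
          congr 1
          apply List.filter_congr
          intro p hp
          have hx : p.2 ∈ l := by
            rcases (PySem.List.mem_enumerate_iff l 0 p).mp hp with ⟨k, hk, rfl⟩
            exact List.getElem_mem hk
          simp only [decide_eq_decide]
          exact mem_take3_iff_getLast_le s (PySem.List.sorted_pairwise_rev l (fun y => y)) p.2
            ((PySem.List.mem_sorted l _ true p.2).mpr hx) hne
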